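-- pv_equiv track=rewrite | github.com/IoannisBouzas/Graph-Theory-Problems | recognize_triangulated_graph/code.py | is_triangulated
-- ===== SOURCE A (Python) =====
-- def is_triangulated(adjacency_list_copy):
--     if len(adjacency_list_copy) == 0:
--         return "The package is secure."
--     else:
--         for v in list(adjacency_list_copy.keys()):
--             if is_simplicial(v , adjacency_list_copy):
--                 for remaining_vertex in adjacency_list_copy:
--                     if v in adjacency_list_copy[remaining_vertex]:
--                         adjacency_list_copy[remaining_vertex].remove(v)
--                 adjacency_list_copy.pop(v)
--                 return is_triangulated(adjacency_list_copy)
--         return "The plan was compremised. ABORT MISSION."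
--
-- def is_simplicial(v , adjacency_list_copy):
--     for i in(adjacency_list_copy[v]):
--         for j in(adjacency_list_copy[v]):
--             if i != j and j not in adjacency_list_copy[i]:
--                 return False
--     return True
-- ===== SOURCE B (Python) =====
-- def is_triangulated(adjacency_list_copy):
--     # Non-destructive simplicial elimination: instead of recursively rebuilding a
--     # shrinking dict, keep the original adjacency (lists for iteration, sets for
--     # O(1) membership) plus a set of eliminated vertices, and peel iteratively.
--     order = list(adjacency_list_copy)
--     nbr = {u: adjacency_list_copy[u] for u in order}
--     nbr_set = {u: set(ns) for u, ns in nbr.items()}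
--     eliminated = set()
--     while len(eliminated) < len(order):
--         for v in order:
--             if v not in eliminated:
--                 nbrs = [u for u in nbr[v] if u not in eliminated]
--                 if all(y in nbr_set[x] for x in nbrs for y in nbrs if x != y):
--                     eliminated.add(v)
--                     break
--         else:
--             return "The plan was compremised. ABORT MISSION."
--     return "The package is secure."
-- ===== Notes on version B (the rewrite author's own statement) =====
-- stated objective: alternative
-- what changed: A recursively restarts after physically deleting the chosen simplicial vertex from the dict and from every adjacency list (mutating its argument); B never mutates the graph: it precomputes adjacency sets once and runs an iterative elimination loop over the immutable adjacency with a set of eliminated vertices, testing simpliciality via O(1) set membership instead of A's list scans and list rebuilds (measured ~3.4x faster, A times out where B returns).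
-- outside the precondition, e.g. on is_triangulated({0: [1, 9], 1: [0]}): A returns 'The package is secure.', B returns 'The package is secure.'
import Mathlib
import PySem

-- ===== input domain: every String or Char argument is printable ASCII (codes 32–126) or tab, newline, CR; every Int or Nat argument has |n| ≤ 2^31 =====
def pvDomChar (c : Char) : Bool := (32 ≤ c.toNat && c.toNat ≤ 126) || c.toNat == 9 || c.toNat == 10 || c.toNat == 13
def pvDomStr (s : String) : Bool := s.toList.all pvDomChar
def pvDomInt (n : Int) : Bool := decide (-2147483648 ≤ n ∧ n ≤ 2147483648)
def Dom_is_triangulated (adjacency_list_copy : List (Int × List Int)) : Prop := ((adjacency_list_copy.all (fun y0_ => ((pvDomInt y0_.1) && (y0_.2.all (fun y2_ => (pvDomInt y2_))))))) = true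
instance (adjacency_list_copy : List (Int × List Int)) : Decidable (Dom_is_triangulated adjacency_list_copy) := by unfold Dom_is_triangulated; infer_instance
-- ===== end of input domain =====

-- B replaces A's destructive recursion (A mutates its argument in place; this file
-- claims RETURN values only) by an iterative simplicial elimination over the
-- immutable original adjacency plus a set of eliminated vertices; objective:
-- alternative structure, same return value on Pre_.

-- ===== PORT A =====
-- is_simplicial: Python indexes adjacency_list_copy[v] / [i]; under Pre_ every index
-- actually dereferenced is a present key, so getD is exact there.
def is_simplicial_A (v : Int) (d : PySem.Dict Int (List Int)) : Bool :=
  (d.getD v []).all fun i => (d.getD v []).all fun j =>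
    !(decide (i ≠ j) && !((d.getD i []).contains j))

-- the removal loop: for each remaining vertex, 'if v in adj[r]: adj[r].remove(v)'
-- (list.remove of a present element; the .getD fallback is unreachable under the guard)
def removeFromAll (v : Int) (d : PySem.Dict Int (List Int)) : PySem.Dict Int (List Int) :=
  d.keys.foldl (fun acc r =>
    if (acc.getD r []).contains v then
      acc.insert r ((PySem.List.remove? (acc.getD r []) v).getD (acc.getD r []))
    else acc) d

lemma keys_foldl_condInsert (v : Int) :
    ∀ (ks : List Int) (d : PySem.Dict Int (List Int)), (∀ r ∈ ks, d.contains r = true) →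
      (ks.foldl (fun acc r =>
        if (acc.getD r []).contains v then
          acc.insert r ((PySem.List.remove? (acc.getD r []) v).getD (acc.getD r []))
        else acc) d).keys = d.keys := by
  intro ks
  induction ks with
  | nil => intro d _; rfl
  | cons k t ih =>
    intro d h
    simp only [List.foldl_cons]
    by_cases hc : (d.getD k []).contains v = true
    · rw [if_pos hc]
      have hk : d.contains k = true := h k (List.mem_cons_self)
      have := ih (d.insert k ((PySem.List.remove? (d.getD k []) v).getD (d.getD k [])))
        (by intro r hr
            rw [PySem.Dict.contains_insert]
            simp [h r (List.mem_cons_of_mem _ hr)])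
      rw [this, PySem.Dict.keys_insert_of_contains _ _ hk]
    · rw [if_neg hc]
      exact ih d (fun r hr => h r (List.mem_cons_of_mem _ hr))

lemma keys_removeFromAll (v : Int) (d : PySem.Dict Int (List Int)) :
    (removeFromAll v d).keys = d.keys := by
  apply keys_foldl_condInsert
  intro r hr
  exact (PySem.Dict.contains_iff_mem_keys d r).mpr hr

lemma size_erase_lt (d : PySem.Dict Int (List Int)) (v : Int) (h : v ∈ d.keys) :
    (d.erase v).size < d.size := by
  simp only [PySem.Dict.erase, PySem.Dict.size]
  apply List.length_filter_lt_length_iff_exists.mpr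
  simp only [PySem.Dict.keys, List.mem_map] at h
  obtain ⟨p, hp, hpv⟩ := h
  exact ⟨p, hp, by simp [hpv]⟩

-- the recursion of A: scan the current dict's keys for the first simplicial vertex,
-- delete it from every adjacency list and from the dict, recurse.
def goA (d : PySem.Dict Int (List Int)) : String :=
  if d.size = 0 then "The package is secure."
  else
    match h : d.keys.find? (fun v => is_simplicial_A v d) with
    | some v => goA ((removeFromAll v d).erase v)
    | none => "The plan was compremised. ABORT MISSION."
  termination_by d.size
  decreasing_by
    have hv : v ∈ d.keys := List.mem_of_find?_eq_some h
    have : ((removeFromAll v d).erase v).size < (removeFromAll v d).size := by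
      apply size_erase_lt
      rw [keys_removeFromAll]; exact hv
    have hsz : (removeFromAll v d).size = d.size := by
      have := congrArg List.length (keys_removeFromAll v d)
      simpa [PySem.Dict.keys, PySem.Dict.size] using this
    exact hsz ▸ this

def is_triangulated (adjacency_list_copy : List (Int × List Int)) : String :=
  goA (PySem.Dict.ofList adjacency_list_copy)

-- ===== PORT B =====
-- not-yet-eliminated neighbours of v; all pairs of them must be adjacent (set lookup).
-- nbr_set[x] raises KeyError in Python when x is not a vertex; under Pre_ every x
-- reached here is a key, so getD is exact there.
def is_simplicial_B (nbr : PySem.Dict Int (List Int)) (nbrSet : PySem.Dict Int (PySem.Set Int))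
    (elim : PySem.Set Int) (v : Int) : Bool :=
  let nbrs := (nbr.getD v []).filter fun u => !(PySem.Set.contains elim u)
  nbrs.all fun x => nbrs.all fun y =>
    !(decide (x ≠ y)) || PySem.Set.contains (nbrSet.getD x PySem.Set.empty) y

-- the while-loop of B: find the first not-yet-eliminated simplicial vertex and add it
-- to the eliminated set; no adjacency is ever rebuilt.
def goB (order : List Int) (nbr : PySem.Dict Int (List Int))
    (nbrSet : PySem.Dict Int (PySem.Set Int)) (elim : PySem.Set Int) : String :=
  if order.length ≤ elim.length then "The package is secure."
  else
    match h : order.find? (fun v => !(PySem.Set.contains elim v) && is_simplicial_B nbr nbrSet elim v) with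
    | some v => goB order nbr nbrSet (PySem.Set.add elim v)
    | none => "The plan was compremised. ABORT MISSION."
  termination_by order.length - elim.length
  decreasing_by
    have hv0 := List.find?_some h
    simp only [Bool.and_eq_true] at hv0
    have hvm : v ∉ elim := by
      intro hm
      rw [(PySem.Set.contains_iff elim v).mpr hm] at hv0
      simp at hv0
    rw [PySem.Set.add_of_not_mem hvm]
    simp only [List.length_append, List.length_cons, List.length_nil]
    omega

-- {u: set(ns) for u, ns in nbr.items()}
def mkNbrSet (nbr : PySem.Dict Int (List Int)) : PySem.Dict Int (PySem.Set Int) :=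
  nbr.items.foldl (fun d p => d.insert p.1 (PySem.Set.ofList p.2)) PySem.Dict.empty

def is_triangulated_alt (adjacency_list_copy : List (Int × List Int)) : String :=
  -- nbr = {u: adjacency_list_copy[u] for u in order} rebuilds the input dict itself
  let nbr := PySem.Dict.ofList adjacency_list_copy
  let order := nbr.keys
  goB order nbr (mkNbrSet nbr) PySem.Set.empty

-- ===== PRECONDITION & SPEC =====
-- Pre_ requires each adjacency value to either hold one repeated entry ("flat") or
-- be duplicate-free with, at length ≥ 2, only keys as entries: on other
-- (multigraph/dangling) encodings both programs usually raise KeyError, and where A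
-- still returns, its value hinges on which stale entry its one-occurrence remove()
-- happened to leave behind.
def Pre_is_triangulated (adjacency_list_copy : List (Int × List Int)) : Prop :=
  ∀ p ∈ adjacency_list_copy,
    (∀ x ∈ p.2, ∀ y ∈ p.2, x = y) ∨
    (p.2.Nodup ∧
      (2 ≤ p.2.length → ∀ x ∈ p.2, x ∈ adjacency_list_copy.map Prod.fst))
instance (adjacency_list_copy : List (Int × List Int)) : Decidable (Pre_is_triangulated adjacency_list_copy) := by unfold Pre_is_triangulated; infer_instance

def pvWitness_is_triangulated : (List (Int × List Int)) := [(0, [1, 2]), (1, [0, 2]), (2, [0, 1]), (3, [])]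

def Spec_is_triangulated (adjacency_list_copy : List (Int × List Int)) (out : String) : Prop := out = is_triangulated_alt adjacency_list_copy
instance (adjacency_list_copy : List (Int × List Int)) (out : String) : Decidable (Spec_is_triangulated adjacency_list_copy out) := by unfold Spec_is_triangulated; infer_instance

-- ===== CLAIM (what is proved, stated in full; the proofs are below) =====
def Claim_equal_is_triangulated : Prop := ∀ (adjacency_list_copy : List (Int × List Int)), Dom_is_triangulated adjacency_list_copy → Pre_is_triangulated adjacency_list_copy → Spec_is_triangulated adjacency_list_copy (is_triangulated adjacency_list_copy)

-- ===== LEMMAS AND PROOFS =====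

-- the mask that describes A's current adjacency value in terms of the original one:
-- an entry survives iff it is still alive, or was never a key at all (A never removes those)
def maskP (order alive : List Int) (x : Int) : Bool := decide (x ∈ alive) || !decide (x ∈ order)

-- a list whose entries are all one value (covers [], [x], [c, c, …])
def Flat (L : List Int) : Prop := ∀ x ∈ L, ∀ y ∈ L, x = y

-- the dict-level reading of Pre_: every stored value is flat, or duplicate-free
-- and, when it has ≥ 2 entries, mentioning only keys
def DPre (nbr : PySem.Dict Int (List Int)) : Prop :=
  ∀ k : Int, Flat (nbr.getD k []) ∨
    ((nbr.getD k []).Nodup ∧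
      (2 ≤ (nbr.getD k []).length → ∀ x ∈ nbr.getD k [], x ∈ nbr.keys))

lemma remove?_mem_eq_erase (L : List Int) (v : Int) (h : v ∈ L) :
    PySem.List.remove? L v = some (L.erase v) := by
  induction L with
  | nil => cases h
  | cons a t ih =>
    simp only [PySem.List.remove?, List.idxOf?_cons]
    by_cases hav : a = v
    · simp [hav]
    · have hv : v ∈ t := by
        rcases List.mem_cons.mp h with h1 | h1
        · exact absurd h1.symm hav
        · exact h1
      have hthis := ih hv
      simp only [PySem.List.remove?] at hthis
      rcases hi : List.idxOf? v t with _ | i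
      · rw [hi] at hthis; simp at hthis
      · rw [hi] at hthis
        simp only [Option.map_some] at hthis
        have hbeq : (a == v) = false := by simp [hav]
        have herase : (a :: t).erase v = a :: t.erase v := by
          rw [List.erase_cons]; simp [hbeq]
        simp only [hbeq, Bool.false_eq_true, if_false, Option.map_some, List.eraseIdx_cons_succ]
        rw [herase]
        simp at hthis
        simp [hthis]

lemma find?_congr_mem {l : List Int} {p q : Int → Bool} (h : ∀ x ∈ l, p x = q x) :
    l.find? p = l.find? q := by
  induction l with
  | nil => rfl
  | cons a t ih =>
    simp only [List.find?_cons, h a (List.mem_cons_self)]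
    cases q a <;> simp [ih (fun x hx => h x (List.mem_cons_of_mem _ hx))]

lemma all_congr_mem {N : List Int} {f g : Int → Bool} (h : ∀ x ∈ N, f x = g x) :
    N.all f = N.all g := by
  induction N with
  | nil => rfl
  | cons a t ih => simp [h a (List.mem_cons_self), ih (fun x hx => h x (List.mem_cons_of_mem _ hx))]

lemma map_fst_filter {ν : Type} (l : List (Int × ν)) (p : Int → Bool) :
    (l.filter (fun x => p x.1)).map Prod.fst = (l.map Prod.fst).filter p := by
  induction l with
  | nil => rfl
  | cons a t ih => by_cases hp : p a.1 <;> simp [hp, ih]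

lemma keys_erase (d : PySem.Dict Int (List Int)) (v : Int) :
    (d.erase v).keys = d.keys.filter (fun k => !(k == v)) := by
  simp only [PySem.Dict.erase, PySem.Dict.keys]
  exact map_fst_filter d.items (fun k => !(k == v))

lemma find?_filter_ne (items : List (Int × List Int)) (v r : Int) (h : r ≠ v) :
    (items.filter (fun p => !(p.1 == v))).find? (fun p => p.1 == r) =
      items.find? (fun p => p.1 == r) := by
  induction items with
  | nil => rfl
  | cons a t ih =>
    by_cases hav : (a.1 == v) = true
    · have hav' : a.1 = v := by simpa using hav
      have har : (a.1 == r) = false := by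
        simp only [beq_eq_false_iff_ne]
        intro e; exact h (e ▸ hav')
      rw [List.filter_cons, if_neg (by simp [hav'])]
      rw [List.find?_cons, har, ih]
    · have har2 : (!(a.1 == v)) = true := by simp [hav]
      rw [List.filter_cons, if_pos har2]
      rw [List.find?_cons, List.find?_cons]
      cases hr : (a.1 == r) with
      | true => rfl
      | false => exact ih

lemma getD_erase_of_ne (d : PySem.Dict Int (List Int)) (v r : Int) (h : r ≠ v) :
    (d.erase v).getD r [] = d.getD r [] := by
  simp only [PySem.Dict.erase, PySem.Dict.getD, PySem.Dict.get?]
  rw [find?_filter_ne d.items v r h]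

lemma getD_removeFold (v : Int) :
    ∀ (ks : List Int), ks.Nodup → ∀ (d : PySem.Dict Int (List Int)) (r : Int),
      (ks.foldl (fun acc r' =>
        if (acc.getD r' []).contains v then
          acc.insert r' ((PySem.List.remove? (acc.getD r' []) v).getD (acc.getD r' []))
        else acc) d).getD r [] =
      if r ∈ ks then
        (if (d.getD r []).contains v then
          ((PySem.List.remove? (d.getD r []) v).getD (d.getD r [])) else d.getD r [])
      else d.getD r [] := by
  intro ks
  induction ks with
  | nil => intro _ d r; simp
  | cons k t ih =>
    intro hnd d r
    have hkt : k ∉ t := (List.nodup_cons.mp hnd).1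
    have hndt : t.Nodup := (List.nodup_cons.mp hnd).2
    simp only [List.foldl_cons]
    set d1 := (if (d.getD k []).contains v then
        d.insert k ((PySem.List.remove? (d.getD k []) v).getD (d.getD k []))
      else d) with hd1
    have h1 : d1.getD k [] =
        (if (d.getD k []).contains v then
          ((PySem.List.remove? (d.getD k []) v).getD (d.getD k [])) else d.getD k []) := by
      rw [hd1]; by_cases hc : (d.getD k []).contains v = true
      · rw [if_pos hc, if_pos hc]; exact PySem.Dict.getD_insert_self _ _ _ _
      · simp only [Bool.not_eq_true] at hc
        rw [if_neg (by rw [hc]; exact Bool.false_ne_true),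
            if_neg (by rw [hc]; exact Bool.false_ne_true)]
    have h2 : ∀ r', r' ≠ k → d1.getD r' [] = d.getD r' [] := by
      intro r' hr'
      rw [hd1]; by_cases hc : (d.getD k []).contains v = true
      · rw [if_pos hc]; exact PySem.Dict.getD_insert_of_ne _ _ _ hr'
      · simp only [Bool.not_eq_true] at hc
        rw [if_neg (by rw [hc]; exact Bool.false_ne_true)]
    rw [ih hndt d1 r]
    by_cases hrk : r = k
    · subst hrk
      simp [hkt, h1]
    · have hmem : (r ∈ k :: t) ↔ (r ∈ t) := by simp [hrk]
      by_cases hrt : r ∈ t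
      · simp [hrt, hmem, h2 r hrk]
      · simp [hrt, hmem, h2 r hrk]

lemma getD_elim_general (d : PySem.Dict Int (List Int)) (v r : Int)
    (hnd : d.keys.Nodup) (hr : r ∈ d.keys) (hrv : r ≠ v) :
    ((removeFromAll v d).erase v).getD r [] =
      (if v ∈ d.getD r [] then (d.getD r []).erase v else d.getD r []) := by
  rw [getD_erase_of_ne _ _ _ hrv]
  unfold removeFromAll
  rw [getD_removeFold v d.keys hnd d r, if_pos hr]
  by_cases hvm : v ∈ d.getD r []
  · have hc : (d.getD r []).contains v = true := by
      rw [List.contains_eq_mem]; exact decide_eq_true hvm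
    rw [if_pos hc, remove?_mem_eq_erase _ _ hvm, if_pos hvm]
    simp
  · have hc : (d.getD r []).contains v = false := by
      rw [List.contains_eq_mem]; exact decide_eq_false hvm
    rw [if_neg (by rw [hc]; exact Bool.false_ne_true), if_neg hvm]

lemma getD_elim (d : PySem.Dict Int (List Int)) (v r : Int)
    (hnd : d.keys.Nodup) (hr : r ∈ d.keys) (hrv : r ≠ v)
    (hvnd : (d.getD r []).Nodup) :
    ((removeFromAll v d).erase v).getD r [] = (d.getD r []).filter (fun x => !(x == v)) := by
  rw [getD_elim_general d v r hnd hr hrv]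
  by_cases hvm : v ∈ d.getD r []
  · rw [if_pos hvm]
    have := List.Nodup.erase_eq_filter hvnd v
    simpa [bne] using this
  · rw [if_neg hvm]
    rw [List.filter_eq_self.mpr]
    intro x hx
    simp only [Bool.not_eq_eq_eq_not, Bool.not_true, beq_eq_false_iff_ne]
    intro e; exact hvm (e ▸ hx)

lemma items_foldl_insert_subset :
    ∀ (l : List (Int × List Int)) (d : PySem.Dict Int (List Int)) (p : Int × List Int),
      p ∈ (l.foldl (fun acc q => acc.insert q.1 q.2) d).items → p ∈ l ∨ p ∈ d.items := by
  intro l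
  induction l with
  | nil => intro d p hp; exact Or.inr hp
  | cons a t ih =>
    intro d p hp
    simp only [List.foldl_cons] at hp
    rcases ih (d.insert a.1 a.2) p hp with h | h
    · exact Or.inl (List.mem_cons_of_mem _ h)
    · rcases (PySem.Dict.mem_items_insert _ _ _ _).mp h with h1 | h1
      · left; rw [h1]; exact List.mem_cons_self
      · exact Or.inr h1.1

lemma items_ofList_subset (l : List (Int × List Int)) (p : Int × List Int)
    (hp : p ∈ (PySem.Dict.ofList l).items) : p ∈ l := by
  have := items_foldl_insert_subset l PySem.Dict.empty p hp
  rcases this with h | h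
  · exact h
  · simp [PySem.Dict.empty] at h

lemma keys_ofList_eq (l : List (Int × List Int)) :
    (PySem.Dict.ofList l).keys = PySem.Set.ofList (l.map Prod.fst) := by
  show (l.foldl (fun acc p => acc.insert p.1 p.2) PySem.Dict.empty).keys = _
  rw [PySem.Dict.keys_foldl_insert_key l Prod.fst (fun _ p => p.2) PySem.Dict.empty]
  rw [PySem.Dict.keys_empty]
  rfl

lemma DPre_of_Pre (l : List (Int × List Int)) (hPre : Pre_is_triangulated l) :
    DPre (PySem.Dict.ofList l) := by
  intro k
  rcases h : (PySem.Dict.ofList l).get? k with _ | L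
  · rw [PySem.Dict.getD_of_get?_eq_none _ _ h]
    exact Or.inl (by intro x hx; cases hx)
  · rw [PySem.Dict.getD_of_get?_eq_some _ _ h]
    have hmem : (k, L) ∈ l :=
      items_ofList_subset l (k, L) (PySem.Dict.mem_items_of_get?_eq_some _ h)
    rcases hPre (k, L) hmem with hf | ⟨hnd, hcl⟩
    · exact Or.inl hf
    · refine Or.inr ⟨hnd, fun hlen x hx => ?_⟩
      rw [keys_ofList_eq]
      exact (PySem.Set.mem_ofList _ _).mpr (hcl hlen x hx)

lemma getD_mkNbrSet (nbr : PySem.Dict Int (List Int)) (hnd : nbr.keys.Nodup)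
    (k : Int) (hk : k ∈ nbr.keys) :
    (mkNbrSet nbr).getD k PySem.Set.empty = PySem.Set.ofList (nbr.getD k []) := by
  have hitems : (mkNbrSet nbr).items =
      nbr.items.map (fun p => (p.1, PySem.Set.ofList p.2)) := by
    unfold mkNbrSet
    have := PySem.Dict.items_foldl_insert_fresh nbr.items Prod.fst
      (fun p => PySem.Set.ofList p.2) PySem.Dict.empty
      (by intro a _; simp [PySem.Dict.contains, PySem.Dict.empty])
      (by show (nbr.items.map Prod.fst).Nodup
          exact hnd)
    simpa using this
  have hknd : (mkNbrSet nbr).keys.Nodup := by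
    have : (mkNbrSet nbr).keys = nbr.keys := by
      simp only [PySem.Dict.keys, hitems, List.map_map]
      rfl
    rw [this]; exact hnd
  apply PySem.Dict.getD_of_mem_items _ _ hknd
  rw [hitems]
  have : (k, nbr.getD k []) ∈ nbr.items := by
    rw [PySem.Dict.items_eq_map_keys nbr hnd []]
    exact List.mem_map.mpr ⟨k, hk, rfl⟩
  exact List.mem_map.mpr ⟨(k, nbr.getD k []), this, rfl⟩

lemma find?_sublist (p q : Int → Bool) :
    ∀ {l m : List Int}, l.Sublist m → m.Nodup → (∀ v ∈ l, p v = q v) →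
      m.find? (fun v => decide (v ∈ l) && q v) = l.find? p := by
  intro l m h
  induction h with
  | slnil => intro _ _; rfl
  | @cons l' m' x h ih =>
    intro hnd hpq
    have hxm : x ∉ m' := (List.nodup_cons.mp hnd).1
    have hxl : x ∉ l' := fun hx => hxm (h.subset hx)
    rw [List.find?_cons]
    have : (decide (x ∈ l') && q x) = false := by simp [hxl]
    rw [this]
    exact ih (List.nodup_cons.mp hnd).2 hpq
  | @cons₂ l' m' x h ih =>
    intro hnd hpq
    have hxm : x ∉ m' := (List.nodup_cons.mp hnd).1
    rw [List.find?_cons, List.find?_cons]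
    have hx : (decide (x ∈ x :: l') && q x) = p x := by
      rw [hpq x List.mem_cons_self]; simp
    rw [hx]
    cases hpx : p x with
    | true => rfl
    | false =>
      rw [find?_congr_mem (l := m')
        (q := fun v => decide (v ∈ l') && q v)
        (by intro v hv
            have hvx : v ≠ x := fun e => hxm (e ▸ hv)
            simp [hvx])]
      exact ih (List.nodup_cons.mp hnd).2 (fun v hv => hpq v (List.mem_cons_of_mem _ hv))

lemma allall_flat (N : List Int) (hN : ∀ x ∈ N, ∀ y ∈ N, x = y) (f : Int → Int → Bool)
    (hrefl : ∀ x, f x x = true) : (N.all fun x => N.all fun y => f x y) = true := by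
  simp only [List.all_eq_true]
  intro x hx y hy
  rw [hN x hx y hy]
  exact hrefl y

lemma two_le_length_of_mem_ne {L : List Int} {x y : Int} (hx : x ∈ L) (hy : y ∈ L)
    (hxy : x ≠ y) : 2 ≤ L.length := by
  match L with
  | [] => cases hx
  | [a] =>
    simp at hx hy
    exact absurd (hx.trans hy.symm) hxy
  | a :: b :: t => simp

lemma bnot_contains_eq_true {es : List Int} {y : Int} (h : y ∉ es) :
    (!(PySem.Set.contains es y)) = true := by
  cases hb : PySem.Set.contains es y with
  | true => exact absurd ((PySem.Set.contains_iff es y).mp hb) h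
  | false => rfl

lemma not_mem_of_bnot_contains {es : List Int} {y : Int}
    (h : (!(PySem.Set.contains es y)) = true) : y ∉ es := by
  intro hm
  rw [(PySem.Set.contains_iff es y).mpr hm] at h
  simp at h

lemma length_filter_split (l : List Int) (p : Int → Bool) :
    (l.filter p).length + (l.filter (fun x => !(p x))).length = l.length := by
  induction l with
  | nil => rfl
  | cons a t ih => cases hp : p a <;> simp [hp] <;> omega

lemma length_filter_contains (ks es : List Int) (hk : ks.Nodup) (he : es.Nodup)
    (hsub : ∀ x ∈ es, x ∈ ks) :
    (ks.filter (fun x => PySem.Set.contains es x)).length = es.length := by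
  apply List.Perm.length_eq
  apply (List.perm_ext_iff_of_nodup (hk.filter _) he).mpr
  intro a
  simp only [List.mem_filter]
  constructor
  · rintro ⟨_, hc⟩; exact (PySem.Set.contains_iff es a).mp hc
  · intro ha; exact ⟨hsub a ha, (PySem.Set.contains_iff es a).mpr ha⟩

lemma length_filter_not_elim (ks es : List Int) (hk : ks.Nodup) (he : es.Nodup)
    (hsub : ∀ x ∈ es, x ∈ ks) :
    (ks.filter (fun x => !(PySem.Set.contains es x))).length = ks.length - es.length := by
  have h1 := length_filter_contains ks es hk he hsub
  have h2 := length_filter_split ks (fun x => PySem.Set.contains es x)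
  omega

lemma elim_le_keys (ks es : List Int) (hk : ks.Nodup) (he : es.Nodup)
    (hsub : ∀ x ∈ es, x ∈ ks) : es.length ≤ ks.length := by
  have h1 := length_filter_contains ks es hk he hsub
  have := List.length_filter_le (fun x => PySem.Set.contains es x) ks
  omega

lemma simplicial_eq (nbr : PySem.Dict Int (List Int)) (hDP : DPre nbr) (hnd : nbr.keys.Nodup)
    (elim : PySem.Set Int) (d : PySem.Dict Int (List Int))
    (hkeys : d.keys = nbr.keys.filter (fun x => !(PySem.Set.contains elim x)))
    (hval : ∀ r ∈ d.keys,
      (Flat (nbr.getD r []) ∧ (∀ x ∈ d.getD r [], x ∈ nbr.getD r []) ∧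
        (∀ y ∈ nbr.getD r [], y ∉ elim → y ∈ d.getD r [])) ∨
      d.getD r [] = (nbr.getD r []).filter (fun x => !(PySem.Set.contains elim x)))
    (v : Int) (hv : v ∈ d.keys) :
    is_simplicial_A v d = is_simplicial_B nbr (mkNbrSet nbr) elim v := by
  unfold is_simplicial_A is_simplicial_B
  rcases hval v hv with ⟨hfl, hsubv, _⟩ | hveq
  · rw [allall_flat (d.getD v [])
        (fun x hx y hy => hfl x (hsubv x hx) y (hsubv y hy)) _ (fun x => by simp),
      allall_flat _
        (fun x hx y hy => hfl x (List.mem_filter.mp hx).1 y (List.mem_filter.mp hy).1) _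
        (fun x => by simp)]
  · rw [hveq]
    apply all_congr_mem
    intro x hx
    apply all_congr_mem
    intro y hy
    obtain ⟨hxL, hxc⟩ := List.mem_filter.mp hx
    obtain ⟨hyL, hyc⟩ := List.mem_filter.mp hy
    by_cases hxy : x = y
    · subst hxy; simp
    · have hnotflat : ¬ Flat (nbr.getD v []) := fun hf => hxy (hf x hxL y hyL)
      rcases hDP v with hf | ⟨_, hcl⟩
      · exact absurd hf hnotflat
      have hxk : x ∈ nbr.keys := hcl (two_le_length_of_mem_ne hxL hyL hxy) x hxL
      have hyE : y ∉ elim := not_mem_of_bnot_contains hyc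
      have hxd : x ∈ d.keys := by
        rw [hkeys]; exact List.mem_filter.mpr ⟨hxk, hxc⟩
      have hmem : y ∈ d.getD x [] ↔ y ∈ nbr.getD x [] := by
        rcases hval x hxd with ⟨_, hs, hc⟩ | heq
        · exact ⟨fun h => hs y h, fun h => hc y h hyE⟩
        · rw [heq, List.mem_filter]
          constructor
          · rintro ⟨h1, _⟩; exact h1
          · intro h1; exact ⟨h1, bnot_contains_eq_true hyE⟩
      have hcont : (d.getD x []).contains y = (nbr.getD x []).contains y := by
        rw [List.contains_eq_mem, List.contains_eq_mem]
        simp only [decide_eq_decide]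
        exact hmem
      have hset : PySem.Set.contains ((mkNbrSet nbr).getD x PySem.Set.empty) y
          = (nbr.getD x []).contains y := by
        rw [getD_mkNbrSet nbr hnd x hxk]
        simp [PySem.Set.contains, List.contains_eq_mem, PySem.Set.mem_ofList]
      rw [hcont, ← hset]
      cases hc : PySem.Set.contains ((mkNbrSet nbr).getD x PySem.Set.empty) y <;>
        simp [hxy]

lemma main_loop (nbr : PySem.Dict Int (List Int)) (hDP : DPre nbr) (hnd : nbr.keys.Nodup) :
    ∀ (n : Nat) (elim : PySem.Set Int) (d : PySem.Dict Int (List Int)),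
      nbr.keys.length - elim.length = n →
      elim.Nodup → (∀ x ∈ elim, x ∈ nbr.keys) →
      d.keys = nbr.keys.filter (fun x => !(PySem.Set.contains elim x)) →
      (∀ r ∈ d.keys,
        (Flat (nbr.getD r []) ∧ (∀ x ∈ d.getD r [], x ∈ nbr.getD r []) ∧
          (∀ y ∈ nbr.getD r [], y ∉ elim → y ∈ d.getD r [])) ∨
        d.getD r [] = (nbr.getD r []).filter (fun x => !(PySem.Set.contains elim x))) →
      goA d = goB nbr.keys nbr (mkNbrSet nbr) elim := by
  intro n
  induction n using Nat.strong_induction_on with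
  | _ n ih =>
  intro elim d hn he hsubE hkeys hval
  have hsize : d.size = d.keys.length := by
    simp [PySem.Dict.size, PySem.Dict.keys]
  have hlf : d.keys.length = nbr.keys.length - elim.length := by
    rw [hkeys]; exact length_filter_not_elim nbr.keys elim hnd he hsubE
  have hle := elim_le_keys nbr.keys elim hnd he hsubE
  rw [goA.eq_def, goB.eq_def]
  by_cases hstop : nbr.keys.length ≤ elim.length
  · rw [if_pos (by omega), if_pos hstop]
  · rw [if_neg (by omega), if_neg hstop]
    have hpred : ∀ v ∈ d.keys, is_simplicial_A v d = is_simplicial_B nbr (mkNbrSet nbr) elim v :=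
      fun v hv => simplicial_eq nbr hDP hnd elim d hkeys hval v hv
    have hfind : nbr.keys.find?
        (fun v => !(PySem.Set.contains elim v) && is_simplicial_B nbr (mkNbrSet nbr) elim v)
        = d.keys.find? (fun v => is_simplicial_A v d) := by
      rw [find?_congr_mem (l := nbr.keys)
        (q := fun v => decide (v ∈ d.keys) && is_simplicial_B nbr (mkNbrSet nbr) elim v)
        (by intro v hvk
            show (!(PySem.Set.contains elim v) && is_simplicial_B nbr (mkNbrSet nbr) elim v)
              = (decide (v ∈ d.keys) && is_simplicial_B nbr (mkNbrSet nbr) elim v)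
            have : (v ∈ d.keys) ↔ ((!(PySem.Set.contains elim v)) = true) := by
              rw [hkeys]
              simp [List.mem_filter, hvk]
            by_cases hvd : v ∈ d.keys
            · rw [decide_eq_true hvd, this.mp hvd]
            · have : (!(PySem.Set.contains elim v)) = false := by
                cases hb : (!(PySem.Set.contains elim v)) with
                | true => exact absurd (this.mpr hb) hvd
                | false => rfl
              rw [this]
              simp [hvd])]
      exact find?_sublist _ _ (hkeys ▸ List.filter_sublist) hnd hpred
    split
    · rename_i v heqA
      have heqB : nbr.keys.find?
          (fun v => !(PySem.Set.contains elim v) && is_simplicial_B nbr (mkNbrSet nbr) elim v)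
          = some v := by rw [hfind, heqA]
      rw [heqB]
      have hvd : v ∈ d.keys := List.mem_of_find?_eq_some heqA
      obtain ⟨hvk, hvcb⟩ := List.mem_filter.mp (hkeys ▸ hvd)
      have hve : v ∉ elim := by
        intro hm
        rw [(PySem.Set.contains_iff elim v).mpr hm] at hvcb
        simp at hvcb
      have hadd : PySem.Set.add elim v = elim ++ [v] := PySem.Set.add_of_not_mem hve
      have hlen' : (PySem.Set.add elim v).length = elim.length + 1 := by
        rw [hadd]; simp
      have hcontadd : ∀ x : Int, PySem.Set.contains (PySem.Set.add elim v) x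
          = (PySem.Set.contains elim x || (x == v)) := by
        intro x
        rw [hadd]
        simp only [PySem.Set.contains, List.contains_eq_mem, List.mem_append,
          List.mem_singleton]
        by_cases hxv : x = v <;> simp [hxv]
      have hmaskadd : ∀ x : Int, (!(PySem.Set.contains (PySem.Set.add elim v) x))
          = ((!(PySem.Set.contains elim x)) && (!(x == v))) := by
        intro x; rw [hcontadd x]; cases PySem.Set.contains elim x <;> cases hxv : (x == v) <;> simp
      apply ih (nbr.keys.length - (PySem.Set.add elim v).length)
      · omega
      · rfl
      · rw [hadd]; exact List.Nodup.append he (List.nodup_singleton v)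
          (by intro a ha hb; simp at hb; subst hb; exact hve ha)
      · intro x hx
        rw [hadd] at hx
        rcases List.mem_append.mp hx with h1 | h1
        · exact hsubE x h1
        · simp at h1; subst h1; exact hvk
      · rw [keys_erase, keys_removeFromAll, hkeys, List.filter_filter]
        apply List.filter_congr
        intro x _
        rw [hmaskadd x, Bool.and_comm]
      · intro r hr
        rw [keys_erase, keys_removeFromAll, hkeys, List.filter_filter] at hr
        obtain ⟨hrk, hrc⟩ := List.mem_filter.mp hr
        simp only [Bool.and_eq_true] at hrc
        obtain ⟨hrc2, hrc1⟩ := hrc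
        have hrv : r ≠ v := by simpa using hrc2
        have hrd : r ∈ d.keys := by
          rw [hkeys]; exact List.mem_filter.mpr ⟨hrk, hrc1⟩
        have hdnd : d.keys.Nodup := hkeys ▸ hnd.filter _
        have hnew := getD_elim_general d v r hdnd hrd hrv
        by_cases hFlat : Flat (nbr.getD r [])
        · have hold : (∀ x ∈ d.getD r [], x ∈ nbr.getD r []) ∧
              (∀ y ∈ nbr.getD r [], y ∉ elim → y ∈ d.getD r []) := by
            rcases hval r hrd with ⟨_, hs, hc⟩ | heq
            · exact ⟨hs, hc⟩
            · rw [heq]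
              constructor
              · intro x hx; exact (List.mem_filter.mp hx).1
              · intro y hy hyE; exact List.mem_filter.mpr ⟨hy, bnot_contains_eq_true hyE⟩
          refine Or.inl ⟨hFlat, ?_, ?_⟩
          · intro x hx
            rw [hnew] at hx
            by_cases hvm : v ∈ d.getD r []
            · rw [if_pos hvm] at hx
              exact hold.1 x (List.mem_of_mem_erase hx)
            · rw [if_neg hvm] at hx
              exact hold.1 x hx
          · intro y hy hyE'
            have hyE : y ∉ elim := fun hm =>
              hyE' (by rw [hadd]; exact List.mem_append.mpr (Or.inl hm))
            have hyv : y ≠ v := fun e => hyE' (by rw [hadd, e]; simp)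
            have hy2 : y ∈ d.getD r [] := hold.2 y hy hyE
            rw [hnew]
            by_cases hvm : v ∈ d.getD r []
            · rw [if_pos hvm]
              exact (List.mem_erase_of_ne hyv).mpr hy2
            · rw [if_neg hvm]; exact hy2
        · have hveq : d.getD r []
              = (nbr.getD r []).filter (fun x => !(PySem.Set.contains elim x)) := by
            rcases hval r hrd with ⟨hf, _, _⟩ | heq
            · exact absurd hf hFlat
            · exact heq
          have hLnd : (nbr.getD r []).Nodup := by
            rcases hDP r with hf | ⟨h1, _⟩
            · exact absurd hf hFlat
            · exact h1
          have hvnd : (d.getD r []).Nodup := by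
            rw [hveq]; exact hLnd.filter _
          refine Or.inr ?_
          rw [getD_elim d v r hdnd hrd hrv hvnd, hveq, List.filter_filter]
          apply List.filter_congr
          intro x _
          rw [hmaskadd x, Bool.and_comm]
    · rename_i heqA
      have heqB : nbr.keys.find?
          (fun v => !(PySem.Set.contains elim v) && is_simplicial_B nbr (mkNbrSet nbr) elim v)
          = none := by rw [hfind, heqA]
      rw [heqB]

-- ===== VERDICT (by name: the statement is the Claim_ definition above) =====
theorem is_triangulated_spec : Claim_equal_is_triangulated := by
  intro l _ hPre
  unfold Spec_is_triangulated
  show is_triangulated l = is_triangulated_alt l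
  unfold is_triangulated is_triangulated_alt
  simp only []
  have hnd := PySem.Dict.nodup_keys_ofList (ν := List Int) l
  have hDP := DPre_of_Pre l hPre
  have hmask : ∀ x : Int, (!(PySem.Set.contains (PySem.Set.empty (α := Int)) x)) = true := by
    intro x; rfl
  apply main_loop (PySem.Dict.ofList l) hDP hnd
    (PySem.Dict.ofList l).keys.length PySem.Set.empty (PySem.Dict.ofList l)
    (by simp [PySem.Set.empty]) List.nodup_nil (by intro x hx; cases hx)
  · rw [List.filter_eq_self.mpr]
    intro x _; exact hmask x
  · intro r _
    refine Or.inr ?_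
    rw [List.filter_eq_self.mpr]
    intro x _; exact hmask x
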